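-- pv_equiv track=rewrite | github.com/mofirojean/50-Coding-Challenge | 50 Coding Challenge Part I/Python/Challenge25.py | mergeExclusive
-- ===== SOURCE A (Python) =====
-- def mergeExclusive(array1, array2):
--     arr = []
--     for i in array1:
--         arr.append(i)
--     for j in array2:
--         if j not in arr:
--             arr.append(j)
--     return sorted(arr)
-- ===== SOURCE B (Python) =====
-- def mergeExclusive(array1, array2):
--     s1 = sorted(array1)
--     s2 = sorted(array2)
--     out = []
--     i = j = 0
--     while i < len(s1) and j < len(s2):
--         if s1[i] < s2[j]:
--             out.append(s1[i])
--             i += 1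
--         elif s1[i] == s2[j]:
--             j += 1
--         else:
--             if j == 0 or s2[j] != s2[j - 1]:
--                 out.append(s2[j])
--             j += 1
--     out.extend(s1[i:])
--     while j < len(s2):
--         if j == 0 or s2[j] != s2[j - 1]:
--             out.append(s2[j])
--         j += 1
--     return out
-- ===== Notes on version B (the rewrite author's own statement) =====
-- stated objective: faster
-- what changed: Instead of copying array1 and scanning the growing list for each array2 element before one final sort, B sorts both arrays up front and does a single two-pointer merge that emits array1's elements, skips array2 values equal to a pending array1 element, and drops adjacent duplicates within sorted array2.
import Mathlib
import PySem

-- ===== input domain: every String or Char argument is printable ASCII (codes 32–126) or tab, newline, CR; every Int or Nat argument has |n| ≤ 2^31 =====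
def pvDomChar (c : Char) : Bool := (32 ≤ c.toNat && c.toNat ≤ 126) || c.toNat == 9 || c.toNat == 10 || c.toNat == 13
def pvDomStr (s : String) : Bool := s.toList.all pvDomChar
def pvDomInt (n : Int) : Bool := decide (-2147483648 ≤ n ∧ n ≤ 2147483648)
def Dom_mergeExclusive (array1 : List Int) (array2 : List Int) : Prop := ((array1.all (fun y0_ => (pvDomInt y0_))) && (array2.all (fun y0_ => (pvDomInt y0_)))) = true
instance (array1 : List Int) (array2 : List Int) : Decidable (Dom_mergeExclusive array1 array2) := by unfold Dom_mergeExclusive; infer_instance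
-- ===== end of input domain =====

-- B replaces A's quadratic membership loop by sorting both arrays and doing a single
-- two-pointer merge that skips array2 values present in array1 and array2-internal duplicates.


-- ===== PORT A =====
def mergeExclusive (array1 : List Int) (array2 : List Int) : List Int :=
  let arr := array1.foldl (fun arr i => arr ++ [i]) []
  let arr := array2.foldl (fun arr j => if arr.contains j then arr else arr ++ [j]) arr
  PySem.List.sorted arr (fun x => x) false

-- ===== PORT B =====
-- The index-based while loops of Source B become structural recursion on the two sorted
-- lists; `prev` is s2[j-1] (none at j = 0), exactly the value Source B's dedup test reads.
def pvMergeLoop (s1 : List Int) (s2 : List Int) (prev : Option Int) : List Int :=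
  match s1, s2 with
  | a :: t1, b :: t2 =>
    if a < b then a :: pvMergeLoop t1 (b :: t2) prev
    else if a = b then pvMergeLoop (a :: t1) t2 (some b)
    else (if prev = some b then [] else [b]) ++ pvMergeLoop (a :: t1) t2 (some b)
  | s1, [] => s1
  | [], b :: t2 => (if prev = some b then [] else [b]) ++ pvMergeLoop [] t2 (some b)
termination_by s1.length + s2.length

def mergeExclusive_alt (array1 : List Int) (array2 : List Int) : List Int :=
  pvMergeLoop (PySem.List.sorted array1 (fun x => x) false)
              (PySem.List.sorted array2 (fun x => x) false) none

-- ===== PRECONDITION & SPEC =====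
def Spec_mergeExclusive (array1 : List Int) (array2 : List Int) (out : List Int) : Prop := out = mergeExclusive_alt array1 array2
instance (array1 : List Int) (array2 : List Int) (out : List Int) : Decidable (Spec_mergeExclusive array1 array2 out) := by unfold Spec_mergeExclusive; infer_instance

-- ===== CLAIM (what is proved, stated in full; the proofs are below) =====
def Claim_equal_mergeExclusive : Prop := ∀ (array1 : List Int) (array2 : List Int), Dom_mergeExclusive array1 array2 → Spec_mergeExclusive array1 array2 (mergeExclusive array1 array2)

-- ===== LEMMAS AND PROOFS =====

-- A's first loop just copies array1.
theorem copy_loop (l acc : List Int) :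
    l.foldl (fun arr i => arr ++ [i]) acc = acc ++ l := by
  induction l generalizing acc with
  | nil => simp
  | cons x t ih => simp [List.foldl, ih]

-- Count of every element after A's second loop.
theorem dedup_loop_count (l acc : List Int) (x : Int) :
    (l.foldl (fun arr j => if arr.contains j then arr else arr ++ [j]) acc).count x
      = acc.count x + (if x ∈ l ∧ x ∉ acc then 1 else 0) := by
  induction l generalizing acc with
  | nil => simp
  | cons j t ih =>
    simp only [List.foldl]
    by_cases hj : acc.contains j
    · rw [if_pos hj, ih]
      have hjm : j ∈ acc := by simpa using hj
      by_cases hx : x = j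
      · subst hx; simp [hjm]
      · simp [List.mem_cons, hx]
    · rw [if_neg hj, ih]
      have hjm : j ∉ acc := by simpa using hj
      by_cases hx : x = j
      · subst hx; simp [hjm, List.count_append]
      · have hca : (acc ++ [j]).count x = acc.count x := by
          simp only [List.count_append, List.count_singleton, beq_iff_eq,
            if_neg (fun (h : j = x) => hx h.symm), Nat.add_zero]
        have hmm : (x ∈ t ∧ x ∉ acc ++ [j]) ↔ (x ∈ j :: t ∧ x ∉ acc) := by
          simp [List.mem_append, List.mem_cons, hx]
        rw [hca]
        simp only [hmm]

-- Every element of the merge output comes from one of the inputs.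
theorem pvMergeLoop_mem (s1 s2 : List Int) (prev : Option Int) (y : Int)
    (hy : y ∈ pvMergeLoop s1 s2 prev) : y ∈ s1 ∨ y ∈ s2 := by
  induction s1, s2, prev using pvMergeLoop.induct with
  | case1 prev a t1 b t2 hab ih =>
    rw [pvMergeLoop, if_pos hab] at hy
    rcases List.mem_cons.mp hy with h | h
    · exact Or.inl (h ▸ List.mem_cons_self)
    · rcases ih h with h1 | h2
      · exact Or.inl (List.mem_cons_of_mem _ h1)
      · exact Or.inr h2
  | case2 prev t1 b t2 hbb ih =>
    rw [pvMergeLoop, if_neg hbb, if_pos rfl] at hy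
    rcases ih hy with h1 | h2
    · exact Or.inl h1
    · exact Or.inr (List.mem_cons_of_mem _ h2)
  | case3 prev a t1 b t2 hab heq ih =>
    rw [pvMergeLoop, if_neg hab, if_neg heq] at hy
    rcases List.mem_append.mp hy with h | h
    · have : y = b := by
        by_cases hp : prev = some b <;> simp [hp] at h
        exact h
      exact Or.inr (this ▸ List.mem_cons_self)
    · rcases ih h with h1 | h2
      · exact Or.inl h1
      · exact Or.inr (List.mem_cons_of_mem _ h2)
  | case4 prev s1 =>
    rw [pvMergeLoop] at hy
    exact Or.inl hy
  | case5 prev b t2 ih =>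
    rw [pvMergeLoop] at hy
    rcases List.mem_append.mp hy with h | h
    · have : y = b := by
        by_cases hp : prev = some b <;> simp [hp] at h
        exact h
      exact Or.inr (this ▸ List.mem_cons_self)
    · rcases ih h with h1 | h2
      · exact Or.inl h1
      · exact Or.inr (List.mem_cons_of_mem _ h2)

-- Count of every element in the merge output.
theorem pvMergeLoop_count (s1 s2 : List Int) (prev : Option Int)
    (h1 : s1.Pairwise (· ≤ ·)) (h2 : s2.Pairwise (· ≤ ·))
    (hp : ∀ p, prev = some p → ∀ y ∈ s2, p ≤ y) (x : Int) :
    (pvMergeLoop s1 s2 prev).count x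
      = s1.count x + (if x ∈ s2 ∧ x ∉ s1 ∧ prev ≠ some x then 1 else 0) := by
  induction s1, s2, prev using pvMergeLoop.induct with
  | case1 prev a t1 b t2 hab ih =>
    rw [pvMergeLoop, if_pos hab]
    have hb2 : ∀ y ∈ t2, b ≤ y := fun y hy => (List.pairwise_cons.mp h2).1 y hy
    rw [List.count_cons, List.count_cons,
      ih h1.of_cons h2 hp]
    by_cases hx : x = a
    · subst hx
      have hno : x ∉ b :: t2 := by
        intro hm
        rcases List.mem_cons.mp hm with h | h
        · exact absurd (h ▸ hab) (lt_irrefl x)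
        · exact absurd (lt_of_lt_of_le hab (hb2 x h)) (lt_irrefl x)
      simp [hno]
    · have hiff : (x ∈ b :: t2 ∧ x ∉ t1 ∧ prev ≠ some x)
          ↔ (x ∈ b :: t2 ∧ x ∉ a :: t1 ∧ prev ≠ some x) := by
        simp [List.mem_cons, hx]
      simp only [hiff]
      ac_rfl
  | case2 prev t1 b t2 hbb ih =>
    rw [pvMergeLoop, if_neg hbb, if_pos rfl]
    have hb2 : ∀ y ∈ t2, b ≤ y := fun y hy => (List.pairwise_cons.mp h2).1 y hy
    rw [ih h1 h2.of_cons (by rintro p hps; injection hps with h; subst h; exact hb2)]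
    have hiff : (x ∈ t2 ∧ x ∉ b :: t1 ∧ (some b : Option Int) ≠ some x)
        ↔ (x ∈ b :: t2 ∧ x ∉ b :: t1 ∧ prev ≠ some x) := by
      constructor
      · rintro ⟨hxt2, hxm, hne⟩
        have hxb : x ≠ b := fun h => hxm (h ▸ List.mem_cons_self)
        exact ⟨List.mem_cons_of_mem _ hxt2, hxm, fun hpx =>
          hxb (le_antisymm (hp x hpx b List.mem_cons_self) (hb2 x hxt2))⟩
      · rintro ⟨hxbt2, hxm, _⟩
        have hxb : x ≠ b := fun h => hxm (h ▸ List.mem_cons_self)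
        exact ⟨(List.mem_cons.mp hxbt2).resolve_left hxb, hxm, by simp [Ne, hxb.symm]⟩
    simp only [hiff]
  | case3 prev a t1 b t2 hab heq ih =>
    rw [pvMergeLoop, if_neg hab, if_neg heq]
    have hba : b < a := lt_of_le_of_ne (not_lt.mp hab) (fun h => heq h.symm)
    have hb2 : ∀ y ∈ t2, b ≤ y := fun y hy => (List.pairwise_cons.mp h2).1 y hy
    have ha1 : ∀ y ∈ t1, a ≤ y := fun y hy => (List.pairwise_cons.mp h1).1 y hy
    have hbn1 : b ∉ a :: t1 := by
      intro hm
      rcases List.mem_cons.mp hm with h | h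
      · exact absurd (h ▸ hba) (lt_irrefl b)
      · exact absurd (lt_of_lt_of_le hba (ha1 b h)) (lt_irrefl b)
    rw [List.count_append,
      ih h1 h2.of_cons (by rintro p hps; injection hps with h; subst h; exact hb2)]
    by_cases hx : x = b
    · subst hx
      have : ¬ ((x ∈ t2) ∧ x ∉ a :: t1 ∧ (some x : Option Int) ≠ some x) := by simp
      rw [if_neg this]
      by_cases hpb : prev = some x
      · simp [hpb, List.mem_cons]
      · simp [hpb, hbn1]
        omega
    · have hcnt : (if prev = some b then ([] : List Int) else [b]).count x = 0 := by
        by_cases hpb : prev = some b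
        · simp [hpb]
        · simp [hpb, List.count_singleton]
          exact fun h => hx h.symm
      rw [hcnt, Nat.zero_add]
      have hiff : (x ∈ t2 ∧ x ∉ a :: t1 ∧ (some b : Option Int) ≠ some x)
          ↔ (x ∈ b :: t2 ∧ x ∉ a :: t1 ∧ prev ≠ some x) := by
        constructor
        · rintro ⟨hxt2, hxm, _⟩
          exact ⟨List.mem_cons_of_mem _ hxt2, hxm, fun hpx =>
            hx (le_antisymm (hp x hpx b List.mem_cons_self) (hb2 x hxt2))⟩
        · rintro ⟨hxbt2, hxm, _⟩
          exact ⟨(List.mem_cons.mp hxbt2).resolve_left hx, hxm, by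
            simp [Ne]; intro h; exact absurd h.symm hx⟩
      simp only [hiff]
  | case4 prev s1 =>
    rw [pvMergeLoop]; simp
  | case5 prev b t2 ih =>
    rw [pvMergeLoop]
    have hb2 : ∀ y ∈ t2, b ≤ y := fun y hy => (List.pairwise_cons.mp h2).1 y hy
    rw [List.count_append,
      ih h1 h2.of_cons (by rintro p hps; injection hps with h; subst h; exact hb2)]
    by_cases hx : x = b
    · subst hx
      have : ¬ ((x ∈ t2) ∧ x ∉ ([] : List Int) ∧ (some x : Option Int) ≠ some x) := by simp
      rw [if_neg this]
      by_cases hpb : prev = some x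
      · simp [hpb, List.mem_cons]
      · simp [hpb]
    · have hcnt : (if prev = some b then ([] : List Int) else [b]).count x = 0 := by
        by_cases hpb : prev = some b
        · simp [hpb]
        · simp [hpb, List.count_singleton]
          exact fun h => hx h.symm
      rw [hcnt, Nat.zero_add]
      have hiff : (x ∈ t2 ∧ x ∉ ([] : List Int) ∧ (some b : Option Int) ≠ some x)
          ↔ (x ∈ b :: t2 ∧ x ∉ ([] : List Int) ∧ prev ≠ some x) := by
        constructor
        · rintro ⟨hxt2, hxm, _⟩
          exact ⟨List.mem_cons_of_mem _ hxt2, hxm, fun hpx =>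
            hx (le_antisymm (hp x hpx b List.mem_cons_self) (hb2 x hxt2))⟩
        · rintro ⟨hxbt2, hxm, _⟩
          exact ⟨(List.mem_cons.mp hxbt2).resolve_left hx, hxm, by
            simp [Ne]; intro h; exact absurd h.symm hx⟩
      simp only [hiff]

-- The merge output is nondecreasing.
theorem pvMergeLoop_pairwise (s1 s2 : List Int) (prev : Option Int)
    (h1 : s1.Pairwise (· ≤ ·)) (h2 : s2.Pairwise (· ≤ ·)) :
    (pvMergeLoop s1 s2 prev).Pairwise (· ≤ ·) := by
  induction s1, s2, prev using pvMergeLoop.induct with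
  | case1 prev a t1 b t2 hab ih =>
    rw [pvMergeLoop, if_pos hab]
    refine List.pairwise_cons.mpr ⟨?_, ih h1.of_cons h2⟩
    intro y hy
    rcases pvMergeLoop_mem _ _ _ _ hy with h | h
    · exact (List.pairwise_cons.mp h1).1 y h
    · rcases List.mem_cons.mp h with h | h
      · exact le_of_lt (h ▸ hab)
      · exact le_of_lt (lt_of_lt_of_le hab ((List.pairwise_cons.mp h2).1 y h))
  | case2 prev t1 b t2 hbb ih =>
    rw [pvMergeLoop, if_neg hbb, if_pos rfl]
    exact ih h1 h2.of_cons
  | case3 prev a t1 b t2 hab heq ih =>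
    rw [pvMergeLoop, if_neg hab, if_neg heq]
    have hba : b < a := lt_of_le_of_ne (not_lt.mp hab) (fun h => heq h.symm)
    have hrec := ih h1 h2.of_cons
    by_cases hpb : prev = some b
    · simpa [hpb] using hrec
    · rw [if_neg hpb]
      refine List.pairwise_cons.mpr ⟨?_, hrec⟩
      intro y hy
      rcases pvMergeLoop_mem _ _ _ _ hy with h | h
      · rcases List.mem_cons.mp h with h | h
        · exact le_of_lt (h ▸ hba)
        · exact le_of_lt (lt_of_lt_of_le hba ((List.pairwise_cons.mp h1).1 y h))
      · exact (List.pairwise_cons.mp h2).1 y h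
  | case4 prev s1 =>
    rw [pvMergeLoop]; exact h1
  | case5 prev b t2 ih =>
    rw [pvMergeLoop]
    have hrec := ih h1 h2.of_cons
    by_cases hpb : prev = some b
    · simpa [hpb] using hrec
    · rw [if_neg hpb]
      refine List.pairwise_cons.mpr ⟨?_, hrec⟩
      intro y hy
      rcases pvMergeLoop_mem _ _ _ _ hy with h | h
      · simp at h
      · exact (List.pairwise_cons.mp h2).1 y h

-- B's output is a permutation of A's pre-sort list.
theorem alt_perm_preA (array1 array2 : List Int) :
    (mergeExclusive_alt array1 array2).Perm
      (array2.foldl (fun arr j => if arr.contains j then arr else arr ++ [j]) array1) := by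
  rw [List.perm_iff_count]
  intro x
  rw [dedup_loop_count]
  unfold mergeExclusive_alt
  rw [pvMergeLoop_count _ _ _ (PySem.List.sorted_pairwise _ _) (PySem.List.sorted_pairwise _ _)
    (by rintro p h; cases h)]
  have hc1 : (PySem.List.sorted array1 (fun x => x) false).count x = array1.count x :=
    (PySem.List.sorted_perm _ _ _).count_eq x
  have hm1 : x ∈ PySem.List.sorted array1 (fun x => x) false ↔ x ∈ array1 :=
    PySem.List.mem_sorted _ _ _ _
  have hm2 : x ∈ PySem.List.sorted array2 (fun x => x) false ↔ x ∈ array2 :=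
    PySem.List.mem_sorted _ _ _ _
  rw [hc1]
  congr 1
  simp [hm1, hm2]

-- ===== VERDICT (by name: the statement is the Claim_ definition above) =====
theorem mergeExclusive_spec : Claim_equal_mergeExclusive := by
  intro array1 array2 _
  unfold Spec_mergeExclusive mergeExclusive
  simp only [copy_loop, List.nil_append]
  exact PySem.List.sorted_id_eq_of_perm_of_pairwise _ _ (alt_perm_preA array1 array2)
    (pvMergeLoop_pairwise _ _ none (PySem.List.sorted_pairwise _ _)
      (PySem.List.sorted_pairwise _ _))
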